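-- pv_equiv track=rewrite | github.com/Sentieon/sentieon-amazon-omics | container/generate_shards.py | split_int
-- ===== SOURCE A (Python) =====
-- from typing import Generator, Optional
--
-- def split_int(size: int, parts: int) -> Generator[tuple[int, int], None, None]:
--     """
--     Split `size` into `parts` of aprox equal size
--     yield: (offset, split_size)
--     """
--     split_size = size // parts
--     carry = size % parts
--     idx = 0
--     while idx < size:
--         _split_size = (split_size + 1) if carry else split_size
--         yield (idx, _split_size)
--         idx += _split_size
--         carry = max(0, carry - 1)
-- ===== SOURCE B (Python) =====
-- def split_int(size: int, parts: int):
--     """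
--     Split `size` into `parts` of aprox equal size
--     yield: (offset, split_size)
--     """
--     split_size = size // parts
--     carry = size % parts
--     for i in range(parts):
--         offset = i * split_size + min(i, carry)
--         if offset >= size:
--             break
--         yield (offset, split_size + (1 if i < carry else 0))
-- ===== Notes on version B (the rewrite author's own statement) =====
-- stated objective: alternative
-- what changed: Replaces A's while-loop with a running idx accumulator and carry-decrement by a for-loop over the part index computing each offset and subsize directly from a positional closed formula (offset = i*split_size + min(i, carry)), breaking when offset reaches size.
import Mathlib
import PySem

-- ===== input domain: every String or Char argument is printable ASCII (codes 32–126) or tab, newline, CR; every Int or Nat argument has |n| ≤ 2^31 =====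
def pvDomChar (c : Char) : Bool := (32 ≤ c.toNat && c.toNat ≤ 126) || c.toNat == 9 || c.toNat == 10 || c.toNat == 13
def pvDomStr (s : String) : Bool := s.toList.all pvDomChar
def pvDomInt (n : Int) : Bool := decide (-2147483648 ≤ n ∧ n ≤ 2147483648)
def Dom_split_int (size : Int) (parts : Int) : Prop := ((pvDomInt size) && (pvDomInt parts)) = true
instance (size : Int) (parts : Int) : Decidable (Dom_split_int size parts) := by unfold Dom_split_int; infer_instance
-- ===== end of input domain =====

-- B computes each part's (offset, subsize) from a positional closed formula over the part
-- index instead of A's running idx accumulator and carry-decrement (objective: alternative).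


-- ===== PORT A =====
-- A's while-loop, with fuel = size.toNat: inside Pre_ every iteration advances idx by at
-- least 1, so the fuel is only a totality guard and is never exhausted while idx < size.
def splitIntLoop (size : Int) (split_size : Int) : Nat → Int → Int → List (Int × Int)
  | 0, _, _ => []
  | fuel + 1, idx, carry =>
    if idx < size then
      let s : Int := if carry ≠ 0 then split_size + 1 else split_size
      (idx, s) :: splitIntLoop size split_size fuel (idx + s) (max 0 (carry - 1))
    else []

def split_int (size : Int) (parts : Int) : List (Int × Int) :=
  splitIntLoop size (PySem.Int.floordiv size parts) size.toNat 0 (PySem.Int.mod size parts)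

-- ===== PORT B =====
-- B's for-loop over i in range(parts), with the break when offset ≥ size.
def splitIntAltLoop (size : Int) (split_size : Int) (carry : Int) : Nat → Int → List (Int × Int)
  | 0, _ => []
  | n + 1, i =>
    let offset : Int := i * split_size + min i carry
    if offset ≥ size then []
    else (offset, split_size + (if i < carry then 1 else 0)) :: splitIntAltLoop size split_size carry n (i + 1)

def split_int_alt (size : Int) (parts : Int) : List (Int × Int) :=
  splitIntAltLoop size (PySem.Int.floordiv size parts) (PySem.Int.mod size parts) parts.toNat 0

-- ===== PRECONDITION & SPEC =====
-- parts = 0 raises ZeroDivisionError in both programs; parts < 0 with size > 0 makes A's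
-- idx decrease forever (the while-loop never terminates). Pre_ excludes exactly those.
def Pre_split_int (size : Int) (parts : Int) : Prop := parts ≠ 0 ∧ (0 < parts ∨ size ≤ 0)
instance (size : Int) (parts : Int) : Decidable (Pre_split_int size parts) := by unfold Pre_split_int; infer_instance
def pvWitness_split_int : Int × Int := (10, 3)

def Spec_split_int (size : Int) (parts : Int) (out : List (Int × Int)) : Prop := out = split_int_alt size parts
instance (size : Int) (parts : Int) (out : List (Int × Int)) : Decidable (Spec_split_int size parts out) := by unfold Spec_split_int; infer_instance

-- ===== CLAIM (what is proved, stated in full; the proofs are below) =====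
def Claim_equal_split_int : Prop := ∀ (size : Int) (parts : Int), Dom_split_int size parts → Pre_split_int size parts → Spec_split_int size parts (split_int size parts)

-- ===== LEMMAS AND PROOFS =====

-- Main invariant: after i iterations A's state is (idx = i*ss + min i c, carry = max 0 (c - i));
-- with that state, the rest of A's loop equals the rest of B's loop started at index i.
theorem splitIntLoop_eq_alt (size ss c : Int) (hss : 0 ≤ ss)
    (parts : Int) (hcp : c < parts) (hsz : size = parts * ss + c) :
    ∀ (fuel : Nat) (i : Int), 0 ≤ i → i ≤ parts →
      size ≤ i * ss + min i c + fuel →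
      splitIntLoop size ss fuel (i * ss + min i c) (max 0 (c - i)) =
        splitIntAltLoop size ss c (parts - i).toNat i := by
  intro fuel
  induction fuel with
  | zero =>
    intro i hi0 hip hfuel
    simp only [Nat.cast_zero, add_zero] at hfuel
    -- A returns [] (fuel 0); B breaks immediately (offset ≥ size) or has n = 0.
    rcases Nat.eq_zero_or_pos (parts - i).toNat with h | h
    · simp [splitIntLoop, h, splitIntAltLoop]
    · obtain ⟨m, hm⟩ : ∃ m, (parts - i).toNat = m + 1 := ⟨(parts - i).toNat - 1, by omega⟩
      rw [hm]
      simp only [splitIntLoop, splitIntAltLoop]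
      rw [if_pos (by omega)]
  | succ fuel ih =>
    intro i hi0 hip hfuel
    by_cases hlt : i * ss + min i c < size
    · -- one more iteration on both sides
      have hipart : i < parts := by
        rcases lt_or_eq_of_le hip with h | h
        · exact h
        · exfalso; rw [h, min_eq_right (le_of_lt hcp)] at hlt; omega
      obtain ⟨m, hm⟩ : ∃ m, (parts - i).toNat = m + 1 := ⟨(parts - i).toNat - 1, by omega⟩
      have hcarry : (max 0 (c - i) ≠ 0) ↔ i < c := by omega
      have hs : (if max 0 (c - i) ≠ 0 then ss + 1 else ss) = ss + (if i < c then 1 else 0) := by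
        by_cases h : i < c
        · rw [if_pos (hcarry.mpr h), if_pos h]
        · rw [if_neg (fun hh => h (hcarry.mp hh)), if_neg h]; ring
      -- the step is positive inside the loop
      have hstep : 1 ≤ ss + (if i < c then 1 else 0) := by
        by_cases h : i < c
        · rw [if_pos h]; omega
        · rw [if_neg h]
          -- if ss = 0 and c ≤ i then idx = min i c = c = size, contradicting hlt
          rcases lt_or_eq_of_le hss with h1 | h1
          · omega
          · exfalso
            rw [min_eq_right (by omega)] at hlt
            rw [← h1] at hlt hsz
            simp only [mul_zero, zero_add] at hlt hsz
            omega
      have hnext : i * ss + min i c + (ss + (if i < c then 1 else 0)) =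
          (i + 1) * ss + min (i + 1) c := by
        by_cases h : i < c
        · rw [if_pos h, min_eq_left (by omega), min_eq_left (by omega)]; ring
        · rw [if_neg h, min_eq_right (by omega), min_eq_right (by omega)]; ring
      have hcnext : max 0 (max 0 (c - i) - 1) = max 0 (c - (i + 1)) := by omega
      rw [hm]
      simp only [splitIntLoop, splitIntAltLoop]
      rw [if_pos hlt, if_neg (show ¬ i * ss + min i c ≥ size by omega)]
      simp only [hs]
      rw [hnext, hcnext]
      have hm' : m = (parts - (i + 1)).toNat := by omega
      have hbound : size ≤ (i + 1) * ss + min (i + 1) c + fuel := by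
        rw [← hnext]; push_cast at hfuel ⊢; omega
      rw [hm', ih (i + 1) (by omega) (by omega) hbound]
    · -- loop is over on both sides
      rcases Nat.eq_zero_or_pos (parts - i).toNat with h | h
      · simp [splitIntLoop, splitIntAltLoop, hlt, h]
      · obtain ⟨m, hm⟩ : ∃ m, (parts - i).toNat = m + 1 := ⟨(parts - i).toNat - 1, by omega⟩
        rw [hm]
        simp only [splitIntLoop, splitIntAltLoop]
        rw [if_neg hlt, if_pos (by omega)]

-- ===== VERDICT (by name: the statement is the Claim_ definition above) =====
theorem split_int_spec : Claim_equal_split_int := by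
  intro size parts _hdom hpre
  obtain ⟨hne, hcase⟩ := hpre
  unfold Spec_split_int split_int split_int_alt
  set ss := PySem.Int.floordiv size parts with hssdef
  set c := PySem.Int.mod size parts with hcdef
  rcases hcase with hp | hsle
  · -- 0 < parts
    by_cases hsle : size ≤ 0
    · -- size ≤ 0: A's fuel is 0; B breaks at the first index (offset 0 ≥ size)
      have hc0 : 0 ≤ c := by rw [hcdef]; exact PySem.Int.mod_nonneg size hp
      rw [show size.toNat = 0 by omega]
      rcases Nat.eq_zero_or_pos parts.toNat with h | h
      · simp [splitIntLoop, h, splitIntAltLoop]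
      · obtain ⟨m, hm⟩ : ∃ m, parts.toNat = m + 1 := ⟨parts.toNat - 1, by omega⟩
        rw [hm]
        simp only [splitIntLoop, splitIntAltLoop]
        rw [if_pos (by omega)]
    · -- 0 < size, 0 < parts: the invariant lemma at i = 0
      have hspos : 0 < size := by omega
      have hc0 : 0 ≤ c := by rw [hcdef, PySem.Int.mod_eq_emod_of_pos hp]; exact Int.emod_nonneg _ (by omega)
      have hcp : c < parts := by rw [hcdef, PySem.Int.mod_eq_emod_of_pos hp]; exact Int.emod_lt_of_pos _ hp
      have hsz : size = parts * ss + c := by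
        have := PySem.Int.floordiv_mul_add_mod size parts
        rw [← hssdef, ← hcdef] at this; linarith [this]
      have hss : 0 ≤ ss := by nlinarith
      have h0 : (0 : Int) * ss + min 0 c = 0 := by rw [min_eq_left hc0]; ring
      have := splitIntLoop_eq_alt size ss c hss parts hcp hsz size.toNat 0
        le_rfl (le_of_lt hp) (by rw [h0]; omega)
      simp only [sub_zero] at this
      rw [h0, max_eq_right hc0] at this
      exact this
  · -- size ≤ 0 (parts may be negative): both loops produce []
    rw [show size.toNat = 0 by omega]
    rcases Nat.eq_zero_or_pos parts.toNat with h | h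
    · simp [splitIntLoop, h, splitIntAltLoop]
    · -- here 0 < parts.toNat forces 0 < parts, so 0 ≤ c and offset 0 ≥ size breaks B
      have hp : 0 < parts := by omega
      have hc0 : 0 ≤ c := by rw [hcdef]; exact PySem.Int.mod_nonneg size hp
      obtain ⟨m, hm⟩ : ∃ m, parts.toNat = m + 1 := ⟨parts.toNat - 1, by omega⟩
      rw [hm]
      simp only [splitIntLoop, splitIntAltLoop]
      rw [if_pos (by omega)]
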